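-- pv_equiv track=rewrite | github.com/UntilVrac/UntilVrac.github.io | serveur_tools/requetes.py | page_exist
-- ===== SOURCE A (Python) =====
-- def page_exist(url:str) -> bool :
--     liste_pages = ["BrickStock", "*404", "BrickStock/pieces", "BrickStock/pieces/prix", "BrickStock/designs", "BrickStock/categories", "BrickStock/couleurs", "BrickStock/sets", "BrickStock/sets/exemplaires_du_set", "BrickStock/sets/prix", "BrickStock/minifigures", "BrickStock/minifigures/prix", "BrickStock/sets/minifigs_du_set", "BrickStock/sets/pieces_du_set", "BrickStock/sets/gammes", "BrickStock/minifigures/gammes", "BrickStock/rangements", "BrickStock/rangements/QR-Codes", "*Fin"]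
--     if len(url) == 0 :
--         url = "/"
--     if url[-1] == "/" :
--         url = url[:-1]
--     L = len(url)
--     for page in liste_pages :
--         if "*" in page :
--             page = page.split("*")
--             i, nb_match = 0, 0
--             for part in page :
--                 l = len(part)
--                 if i + l <= L :
--                     if i == 0 :
--                         if url[:l] == part :
--                             nb_match += 1
--                             i += l
--                     elif i + l == L :
--                         if url[i:] == part :
--                             nb_match += 1
--                             i += l
--                     else :
--                         while i + l <= L :
--                             if url[i:i + l] == part :
--                                 nb_match += 1
--                                 i += l
--                                 break
--                             else :
--                                 i += 1
--             if nb_match == len(page) :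
--                 return True
--         else :
--             if page == url :
--                 return True
--     return False
-- ===== SOURCE B (Python) =====
-- _LITERALS = frozenset([
--     "BrickStock", "BrickStock/pieces", "BrickStock/pieces/prix",
--     "BrickStock/designs", "BrickStock/categories", "BrickStock/couleurs",
--     "BrickStock/sets", "BrickStock/sets/exemplaires_du_set",
--     "BrickStock/sets/prix", "BrickStock/minifigures",
--     "BrickStock/minifigures/prix", "BrickStock/sets/minifigs_du_set",
--     "BrickStock/sets/pieces_du_set", "BrickStock/sets/gammes",
--     "BrickStock/minifigures/gammes", "BrickStock/rangements",
--     "BrickStock/rangements/QR-Codes",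
-- ])
--
--
-- def page_exist(url: str) -> bool:
--     u = url or "/"
--     if u.endswith("/"):
--         u = u[:-1]
--     return u in _LITERALS or u.startswith("404") or u.startswith("Fin")
-- ===== Notes on version B (the rewrite author's own statement) =====
-- stated objective: simpler
-- what changed: A's generic wildcard-split matching engine over a mixed pattern list is replaced by a frozenset membership test of the 17 literal pages plus two direct startswith checks (the two wildcard patterns behave as prefix matches because of the empty first split piece), keeping A's exact normalization of the url.
import Mathlib
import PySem

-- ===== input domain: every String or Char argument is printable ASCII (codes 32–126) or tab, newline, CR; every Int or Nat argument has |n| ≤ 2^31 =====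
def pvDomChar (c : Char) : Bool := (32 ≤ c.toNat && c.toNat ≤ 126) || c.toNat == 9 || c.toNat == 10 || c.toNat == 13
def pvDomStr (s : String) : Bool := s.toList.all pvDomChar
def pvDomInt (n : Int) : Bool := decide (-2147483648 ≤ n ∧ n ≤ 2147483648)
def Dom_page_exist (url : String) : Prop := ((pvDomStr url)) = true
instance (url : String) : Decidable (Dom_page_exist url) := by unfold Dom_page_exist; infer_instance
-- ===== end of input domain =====

-- B replaces A's generic split-on-'*' wildcard matching engine (for a fixed pattern list)
-- by a direct membership test in the 17 literal pages plus two prefix checks (objective: simpler).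

-- ===== PORT A =====
-- A's fixed page list
def paPages : List (List Char) :=
  ["BrickStock".toList, "*404".toList, "BrickStock/pieces".toList, "BrickStock/pieces/prix".toList,
   "BrickStock/designs".toList, "BrickStock/categories".toList, "BrickStock/couleurs".toList,
   "BrickStock/sets".toList, "BrickStock/sets/exemplaires_du_set".toList, "BrickStock/sets/prix".toList,
   "BrickStock/minifigures".toList, "BrickStock/minifigures/prix".toList,
   "BrickStock/sets/minifigs_du_set".toList, "BrickStock/sets/pieces_du_set".toList,
   "BrickStock/sets/gammes".toList, "BrickStock/minifigures/gammes".toList,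
   "BrickStock/rangements".toList, "BrickStock/rangements/QR-Codes".toList, "*Fin".toList]

-- the inner 'while i + l <= L :' scan of A
def paWhile (url : List Char) (L : Nat) (part : List Char) (l : Nat) (i nb : Nat) : Nat × Nat :=
  if _h : i + l ≤ L then
    if PySem.List.slice url (some (i : Int)) (some ((i + l : Nat) : Int)) == part then
      (i + l, nb + 1)
    else
      paWhile url L part l (i + 1) nb
  else (i, nb)
  termination_by L + 1 - i
  decreasing_by omega

-- 'for part in page : …' with state (i, nb_match)
def paParts (url : List Char) (L : Nat) : List (List Char) → Nat → Nat → Nat × Nat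
  | [], i, nb => (i, nb)
  | part :: rest, i, nb =>
    let l := part.length
    if i + l ≤ L then
      if i == 0 then
        if PySem.List.slice url none (some (l : Int)) == part then
          paParts url L rest (i + l) (nb + 1)
        else
          paParts url L rest i nb
      else if i + l == L then
        if PySem.List.slice url (some (i : Int)) none == part then
          paParts url L rest (i + l) (nb + 1)
        else
          paParts url L rest i nb
      else
        let inb := paWhile url L part l i nb
        paParts url L rest inb.1 inb.2
    else
      paParts url L rest i nb

-- 'for page in liste_pages : …' with the early returns
def paLoop (url : List Char) (L : Nat) : List (List Char) → Bool
  | [] => false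
  | page :: rest =>
    if PySem.Chars.isIn ['*'] page then
      let parts := PySem.Chars.splitOn page ['*']
      let nb := (paParts url L parts 0 0).2
      if nb == parts.length then true else paLoop url L rest
    else
      if page == url then true else paLoop url L rest

def page_exist (url : String) : Bool :=
  let u := url.toList
  let u := if u.length == 0 then ['/'] else u
  let u := if PySem.List.pyGet? u (-1) == some '/' then PySem.List.slice u none (some (-1)) else u
  paLoop u u.length paPages

-- ===== PORT B =====
def pbLiterals : List (List Char) :=
  ["BrickStock".toList,
   "BrickStock/pieces".toList,
   "BrickStock/pieces/prix".toList,
   "BrickStock/designs".toList,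
   "BrickStock/categories".toList,
   "BrickStock/couleurs".toList,
   "BrickStock/sets".toList,
   "BrickStock/sets/exemplaires_du_set".toList,
   "BrickStock/sets/prix".toList,
   "BrickStock/minifigures".toList,
   "BrickStock/minifigures/prix".toList,
   "BrickStock/sets/minifigs_du_set".toList,
   "BrickStock/sets/pieces_du_set".toList,
   "BrickStock/sets/gammes".toList,
   "BrickStock/minifigures/gammes".toList,
   "BrickStock/rangements".toList,
   "BrickStock/rangements/QR-Codes".toList]

def page_exist_alt (url : String) : Bool :=
  let u := if url.toList.length == 0 then ['/'] else url.toList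
  let u := if PySem.Chars.endswith u ['/'] then PySem.List.slice u none (some (-1)) else u
  pbLiterals.contains u || PySem.Chars.startswith u "404".toList || PySem.Chars.startswith u "Fin".toList

-- ===== PRECONDITION & SPEC =====
def Spec_page_exist (url : String) (out : Bool) : Prop := out = page_exist_alt url
instance (url : String) (out : Bool) : Decidable (Spec_page_exist url out) := by unfold Spec_page_exist; infer_instance

-- ===== CLAIM (what is proved, stated in full; the proofs are below) =====
def Claim_equal_page_exist : Prop := ∀ (url : String), Dom_page_exist url → Spec_page_exist url (page_exist url)

-- ===== LEMMAS AND PROOFS =====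

-- checking a length-|p| prefix by 'url[:l] == part' is startswith
lemma take_eq_iff_sw (s p : List Char) : (s.take p.length == p) = PySem.Chars.startswith s p := by
  rw [Bool.eq_iff_iff, beq_iff_eq, PySem.Chars.startswith_iff, List.prefix_iff_eq_take]
  exact eq_comm

-- A's part-matching state machine on a split pattern ["", p] is exactly startswith
lemma paParts_wild (s p : List Char) :
    (decide ((paParts s s.length [[], p] 0 0).2 = ([[], p] : List (List Char)).length))
      = PySem.Chars.startswith s p := by
  by_cases h : p.length ≤ s.length
  · rw [← take_eq_iff_sw]
    by_cases ht : List.take p.length s = p <;>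
      simp [paParts, h, ht, PySem.List.slice_to, List.take_zero]
  · have hsw : PySem.Chars.startswith s p = false := by
      rw [Bool.eq_false_iff, Ne, PySem.Chars.startswith_iff]
      intro hpre; exact h hpre.length_le
    simp [paParts, h, hsw, PySem.List.slice_to, List.take_zero]

-- one step of A's page loop, literal page
lemma paLoop_cons_lit (s page : List Char) (L : Nat) (rest : List (List Char))
    (h : PySem.Chars.isIn ['*'] page = false) :
    paLoop s L (page :: rest) = ((page == s) || paLoop s L rest) := by
  simp only [paLoop, h, Bool.false_eq_true, if_false]
  by_cases hp : page = s <;> simp [hp]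

-- one step of A's page loop, wildcard page
lemma paLoop_cons_wild (s page : List Char) (L : Nat) (rest : List (List Char))
    (h : PySem.Chars.isIn ['*'] page = true) :
    paLoop s L (page :: rest) =
      ((decide ((paParts s L (PySem.Chars.splitOn page ['*']) 0 0).2
          = (PySem.Chars.splitOn page ['*']).length)) || paLoop s L rest) := by
  by_cases hm : (paParts s L (PySem.Chars.splitOn page ['*']) 0 0).2
      = (PySem.Chars.splitOn page ['*']).length <;>
    simp [paLoop, h, hm]

-- A's whole loop over the fixed page list equals B's membership-plus-prefix formula
set_option maxHeartbeats 1000000 in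
lemma main_lemma (s : List Char) :
    paLoop s s.length paPages
      = (pbLiterals.contains s || PySem.Chars.startswith s "404".toList
          || PySem.Chars.startswith s "Fin".toList) := by
  have e404 : PySem.Chars.splitOn "*404".toList ['*'] = [[], "404".toList] := by decide
  have eFin : PySem.Chars.splitOn "*Fin".toList ['*'] = [[], "Fin".toList] := by decide
  have hnil : paLoop s s.length ([] : List (List Char)) = false := by simp [paLoop]
  have hstar404 : PySem.Chars.isIn ['*'] "*404".toList = true := by decide
  have hstarFin : PySem.Chars.isIn ['*'] "*Fin".toList = true := by decide
  have hs0 : PySem.Chars.isIn ['*'] "BrickStock".toList = false := by decide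
  have hs1 : PySem.Chars.isIn ['*'] "BrickStock/pieces".toList = false := by decide
  have hs2 : PySem.Chars.isIn ['*'] "BrickStock/pieces/prix".toList = false := by decide
  have hs3 : PySem.Chars.isIn ['*'] "BrickStock/designs".toList = false := by decide
  have hs4 : PySem.Chars.isIn ['*'] "BrickStock/categories".toList = false := by decide
  have hs5 : PySem.Chars.isIn ['*'] "BrickStock/couleurs".toList = false := by decide
  have hs6 : PySem.Chars.isIn ['*'] "BrickStock/sets".toList = false := by decide
  have hs7 : PySem.Chars.isIn ['*'] "BrickStock/sets/exemplaires_du_set".toList = false := by decide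
  have hs8 : PySem.Chars.isIn ['*'] "BrickStock/sets/prix".toList = false := by decide
  have hs9 : PySem.Chars.isIn ['*'] "BrickStock/minifigures".toList = false := by decide
  have hs10 : PySem.Chars.isIn ['*'] "BrickStock/minifigures/prix".toList = false := by decide
  have hs11 : PySem.Chars.isIn ['*'] "BrickStock/sets/minifigs_du_set".toList = false := by decide
  have hs12 : PySem.Chars.isIn ['*'] "BrickStock/sets/pieces_du_set".toList = false := by decide
  have hs13 : PySem.Chars.isIn ['*'] "BrickStock/sets/gammes".toList = false := by decide
  have hs14 : PySem.Chars.isIn ['*'] "BrickStock/minifigures/gammes".toList = false := by decide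
  have hs15 : PySem.Chars.isIn ['*'] "BrickStock/rangements".toList = false := by decide
  have hs16 : PySem.Chars.isIn ['*'] "BrickStock/rangements/QR-Codes".toList = false := by decide
  simp only [paPages, paLoop_cons_lit, paLoop_cons_wild, hnil, hstar404, hstarFin, hs0, hs1, hs2, hs3, hs4, hs5, hs6, hs7, hs8, hs9, hs10, hs11, hs12, hs13, hs14, hs15, hs16,
    e404, eFin]
  have h404 := paParts_wild s "404".toList
  have hFin := paParts_wild s "Fin".toList
  simp only [h404, hFin, pbLiterals, List.contains_cons, List.contains_nil, Bool.or_false,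
    Bool.beq_comm]
  ac_rfl

-- 'url[-1] == "/"' is endswith on a nonempty list
lemma norm_cond (v : List Char) (hv : v ≠ []) :
    (PySem.List.pyGet? v (-1) == some '/') = PySem.Chars.endswith v ['/'] := by
  rcases List.eq_nil_or_concat v with rfl | ⟨xs, x, rfl⟩
  · exact absurd rfl hv
  · rw [Bool.eq_iff_iff]
    simp [pysem, PySem.Chars.endswith_iff, List.suffix_iff_eq_drop]
    exact eq_comm

-- ===== VERDICT (by name: the statement is the Claim_ definition above) =====
theorem page_exist_spec : Claim_equal_page_exist := by
  intro url _
  show page_exist url = page_exist_alt url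
  have hne : (if url.toList.length == 0 then ['/'] else url.toList) ≠ [] := by
    split <;> simp_all
  simp only [page_exist, page_exist_alt, norm_cond _ hne, main_lemma]
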